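-- pv_equiv track=rewrite | github.com/Kim-Ju-won/AdvancedAlgorithmTechniques | 18. 치맥_파티/Main.py | max_chicken
-- ===== SOURCE A (Python) =====
-- def max_chicken(cases):
-- 	# 남은 시간 :min_t, 최대 먹을 수 있는 치킨의 수: max_num
-- 	min_t = 10001
-- 	max_num = -1
-- 	# 입력으로 받은 리스트를 for문을 돌며 연산을 진행합니다.
-- 	# 리스트의 길이는 2~3으로 호출할 때 길이가 고정됩니다.
-- 	# for문 내에서 진행하는 것은 비교연산, 대입연산이 상수번만 진행되므로 O(1)이라고 볼 수 있습니다.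
-- 	for case in cases :
-- 		# 치킨을 더 오랫동안 먹었을 때 (더 적은 시간이 남았을 떄)
-- 		if case[1] < min_t :
-- 			min_t = case[1]
-- 			max_num = case[0]
-- 		# 만약 치킨을 먹고 같은 시간이 남았을 때
-- 		elif case[1] == min_t :
-- 			# 더 많이 먹은 치킨의 갯수로 업데이트
-- 			if case[0] > max_num :
-- 				max_num = case[0]
-- 	return [max_num, min_t]
-- ===== SOURCE B (Python) =====
-- def max_chicken(cases):
--     # Two staged passes over the list extended with the sentinel case (-1, 10001)
--     # (A's initial state): first the winning (minimal) remaining time, then the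
--     # maximum chicken count among the cases achieving it.
--     ext = cases + [(-1, 10001)]
--     min_t = min(t for _, t in ext)
--     max_num = max(n for n, t in ext if t == min_t)
--     return [max_num, min_t]
-- ===== Notes on version B (the rewrite author's own statement) =====
-- stated objective: simpler
-- what changed: Replaces A's fused single-pass argmin loop carrying a two-field mutable state with three branches by two staged aggregation passes: first min() of the times, then max() of the counts filtered to that minimal time, over the list extended with the sentinel case (-1, 10001).
import Mathlib
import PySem

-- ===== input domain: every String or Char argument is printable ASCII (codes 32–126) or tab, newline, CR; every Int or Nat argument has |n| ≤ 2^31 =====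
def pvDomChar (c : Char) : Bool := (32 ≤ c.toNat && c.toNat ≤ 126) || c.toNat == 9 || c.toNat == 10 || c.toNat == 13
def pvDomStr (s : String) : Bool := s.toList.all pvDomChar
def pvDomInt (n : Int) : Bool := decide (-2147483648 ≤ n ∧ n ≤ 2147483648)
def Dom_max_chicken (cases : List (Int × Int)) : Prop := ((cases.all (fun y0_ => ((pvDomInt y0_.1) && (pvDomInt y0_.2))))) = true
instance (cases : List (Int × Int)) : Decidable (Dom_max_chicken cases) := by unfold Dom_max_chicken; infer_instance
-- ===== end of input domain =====

-- B replaces A's fused single-pass argmin loop (mutable two-field state, three branches) by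
-- two staged aggregation passes over the sentinel-extended list; same O(n) cost, simpler.

-- ===== PORT A =====
-- A's loop body on state s = (min_t, max_num); branches in A's order.
def pvStepA (s : Int × Int) (c : Int × Int) : Int × Int :=
  if c.2 < s.1 then (c.2, c.1)
  else if c.2 = s.1 then (if c.1 > s.2 then (s.1, c.1) else s)
  else s

def max_chicken (cases : List (Int × Int)) : List Int :=
  [(cases.foldl pvStepA (10001, -1)).2, (cases.foldl pvStepA (10001, -1)).1]

-- ===== PORT B =====
-- ext = cases + [(-1, 10001)]; min_t = min(times of ext); max_num = max(counts of ext with t == min_t).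
-- Both generator min/max run over nonempty lists, so min?/max? are some.
def max_chicken_alt (cases : List (Int × Int)) : List Int :=
  match PySem.List.min? ((cases ++ [((-1 : Int), (10001 : Int))]).map (fun c => c.2)) (fun x => x) with
  | none => []
  | some min_t =>
    match PySem.List.max? (((cases ++ [((-1 : Int), (10001 : Int))]).filter
        (fun c => c.2 == min_t)).map (fun c => c.1)) (fun x => x) with
    | none => []
    | some max_num => [max_num, min_t]

-- ===== PRECONDITION & SPEC =====
def Spec_max_chicken (cases : List (Int × Int)) (out : List Int) : Prop := out = max_chicken_alt cases
instance (cases : List (Int × Int)) (out : List Int) : Decidable (Spec_max_chicken cases out) := by unfold Spec_max_chicken; infer_instance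

-- ===== CLAIM (what is proved, stated in full; the proofs are below) =====
def Claim_equal_max_chicken : Prop := ∀ (cases : List (Int × Int)), Dom_max_chicken cases → Spec_max_chicken cases (max_chicken cases)

-- ===== LEMMAS AND PROOFS =====

theorem pv_foldl_min_swap (t : List Int) : ∀ a b : Int, t.foldl min (min a b) = min a (t.foldl min b) := by
  induction t with
  | nil => intro a b; rfl
  | cons c t ih => intro a b; simp only [List.foldl_cons, min_assoc, ih]

theorem pv_min_append (xs : List Int) (a : Int) :
    PySem.List.min? (xs ++ [a]) (fun x => x) = some (xs.foldl min a) := by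
  cases xs with
  | nil => rfl
  | cons x t =>
    rw [List.cons_append, PySem.List.min?_id_cons]
    simp only [List.foldl_append, List.foldl_cons, List.foldl_nil]
    rw [min_comm (t.foldl min x) a, ← pv_foldl_min_swap t a x]

theorem pv_max_append (xs : List Int) (a : Int) :
    PySem.List.max? (xs ++ [a]) (fun x => x) = some (xs.foldl max a) := by
  cases xs with
  | nil => rfl
  | cons x t =>
    rw [List.cons_append, PySem.List.max?_id_cons]
    simp only [List.foldl_append, List.foldl_cons, List.foldl_nil]
    have hsw : ∀ (t : List Int) (a b : Int), t.foldl max (max a b) = max a (t.foldl max b) := by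
      intro t
      induction t with
      | nil => intro a b; rfl
      | cons c t ih => intro a b; simp only [List.foldl_cons, max_assoc, ih]
    rw [max_comm (t.foldl max x) a, ← hsw t a x]

theorem pv_foldl_min_le (t : List Int) : ∀ a : Int, t.foldl min a ≤ a := by
  induction t with
  | nil => intro a; exact le_refl a
  | cons c t ih =>
    intro a
    simp only [List.foldl_cons]
    exact le_trans (ih (min a c)) (min_le_left a c)

-- Characterisation of A's fold: the first component is the running min of the times, and
-- max? of the counts of the state-extended list filtered to that min is the second component.
theorem pv_A_char (cs : List (Int × Int)) : ∀ t0 n0 : Int,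
    (cs.foldl pvStepA (t0, n0)).1 = (cs.map (fun c => c.2)).foldl min t0 ∧
    PySem.List.max? (((((n0, t0) : Int × Int) :: cs).filter
        (fun c => c.2 == (cs.map (fun c => c.2)).foldl min t0)).map (fun c => c.1)) (fun x => x)
      = some ((cs.foldl pvStepA (t0, n0)).2) := by
  induction cs with
  | nil =>
    intro t0 n0
    exact ⟨rfl, by simp [PySem.List.max?_id_cons]⟩
  | cons c cs ih =>
    intro t0 n0
    have hstep1 : (pvStepA (t0, n0) c).1 = min t0 c.2 := by
      unfold pvStepA; dsimp only
      by_cases h1 : c.2 < t0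
      · simp [h1]; omega
      · by_cases h2 : c.2 = t0
        · simp [h2]; split <;> omega
        · simp [h1, h2]; omega
    obtain ⟨ih1, ih2⟩ := ih (pvStepA (t0, n0) c).1 (pvStepA (t0, n0) c).2
    rw [Prod.mk.eta] at ih1 ih2
    rw [hstep1] at ih1 ih2
    have hTle : (cs.map (fun c => c.2)).foldl min (min t0 c.2) ≤ min t0 c.2 := pv_foldl_min_le _ _
    constructor
    · simp only [List.foldl_cons, List.map_cons]
      exact ih1
    · simp only [List.foldl_cons, List.map_cons]
      generalize hTg : (cs.map (fun c => c.2)).foldl min (min t0 c.2) = T at ih2 hTle ⊢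
      by_cases ht0 : t0 = T
      · by_cases hc : c.2 = T
        · -- tie: t0 = c.2 = T
          have he : c.2 = t0 := by omega
          have hlt : ¬ c.2 < t0 := by omega
          have hstep : pvStepA (t0, n0) c = (t0, if c.1 > n0 then c.1 else n0) := by
            unfold pvStepA; dsimp only
            rw [if_neg hlt, if_pos he]
            by_cases hgt : c.1 > n0
            · rw [if_pos hgt, if_pos hgt]
            · rw [if_neg hgt, if_neg hgt]
          rw [hstep] at ih2 ⊢
          have hm : min t0 c.2 = T := by omega
          simp only [hm] at ih2
          have hcT : ((T : Int) == T) = true := by simp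
          have hc0 : ((t0 : Int) == T) = true := by simp [ht0]
          have hcc : ((c.2 : Int) == T) = true := by simp [hc]
          simp only [List.filter_cons, hcT, hc0, hcc, if_true, List.map_cons] at ih2 ⊢
          rw [PySem.List.max?_id_cons] at ih2 ⊢
          rw [← ih2]
          congr 1
          simp only [List.foldl_cons]
          congr 1
          split <;> omega
        · -- c dropped: c.2 > T = t0, state unchanged
          have hgt : c.2 > t0 := by omega
          have hstep : pvStepA (t0, n0) c = (t0, n0) := by
            unfold pvStepA; dsimp only
            have h1 : ¬ c.2 < t0 := by omega
            have h2 : ¬ c.2 = t0 := by omega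
            simp [h1, h2]
          rw [hstep] at ih2 ⊢
          have hm : min t0 c.2 = t0 := by omega
          simp only [hm] at ih2
          have hc0 : ((t0 : Int) == T) = true := by simp [ht0]
          have hcc : ((c.2 : Int) == T) = false := by simp [hc]
          simp only [List.filter_cons, hc0, hcc, if_true, Bool.false_eq_true, if_false] at ih2 ⊢
          exact ih2
      · by_cases hc : c.2 = T
        · -- new min via c: c.2 = T < t0
          have hlt : c.2 < t0 := by omega
          have hstep : pvStepA (t0, n0) c = (c.2, c.1) := by
            unfold pvStepA; dsimp only; simp [hlt]
          rw [hstep] at ih2 ⊢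
          have hm : min t0 c.2 = c.2 := by omega
          simp only [hm] at ih2
          have hc0 : ((t0 : Int) == T) = false := by simp [ht0]
          have hcc : ((c.2 : Int) == T) = true := by simp [hc]
          simp only [List.filter_cons, hc0, hcc, if_true, Bool.false_eq_true, if_false] at ih2 ⊢
          exact ih2
        · -- both dropped; state time min t0 c.2 ≠ T
          have hc0 : ((t0 : Int) == T) = false := by simp [ht0]
          have hcc : ((c.2 : Int) == T) = false := by simp [hc]
          have hcm : ((min t0 c.2 : Int) == T) = false := by simp; omega
          simp only [List.filter_cons, hc0, hcc, hcm, Bool.false_eq_true, if_false] at ih2 ⊢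
          exact ih2

-- ===== VERDICT (by name: the statement is the Claim_ definition above) =====
theorem max_chicken_spec : Claim_equal_max_chicken := by
  intro cases _
  unfold Spec_max_chicken max_chicken max_chicken_alt
  obtain ⟨hchar1, hchar2⟩ := pv_A_char cases 10001 (-1)
  have hmin : PySem.List.min? ((cases ++ [((-1 : Int), (10001 : Int))]).map (fun c => c.2)) (fun x => x)
      = some ((cases.map (fun c => c.2)).foldl min 10001) := by
    rw [List.map_append]
    simpa using pv_min_append (cases.map (fun c => c.2)) 10001
  generalize hTg : (cases.map (fun c => c.2)).foldl min 10001 = T at hmin hchar1 hchar2 ⊢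
  have hfilt : ((cases ++ [((-1 : Int), (10001 : Int))]).filter (fun c => c.2 == T)).map (fun c => c.1)
      = ((cases.filter (fun c => c.2 == T)).map (fun c => c.1))
        ++ (if ((10001 : Int) == T) then [(-1 : Int)] else []) := by
    rw [List.filter_append, List.map_append]
    congr 1
    split <;> simp_all
  have hfront : ((((-1 : Int), (10001 : Int)) :: cases).filter (fun c => c.2 == T)).map (fun c => c.1)
      = (if ((10001 : Int) == T) then [(-1 : Int)] else [])
        ++ ((cases.filter (fun c => c.2 == T)).map (fun c => c.1)) := by
    rw [List.filter_cons]
    split <;> simp_all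
  rw [hfront] at hchar2
  have hmax : PySem.List.max? (((cases ++ [((-1 : Int), (10001 : Int))]).filter
        (fun c => c.2 == T)).map (fun c => c.1)) (fun x => x)
      = some ((cases.foldl pvStepA (10001, -1)).2) := by
    rw [hfilt]
    by_cases hs : (10001 : Int) = T
    · have hb : ((10001 : Int) == T) = true := by simp [hs]
      simp only [hb, if_true] at hchar2 ⊢
      rw [pv_max_append]
      rw [List.singleton_append, PySem.List.max?_id_cons] at hchar2
      exact hchar2
    · have hb : ((10001 : Int) == T) = false := by simp [hs]
      simp only [hb, Bool.false_eq_true, if_false, List.append_nil, List.nil_append] at hchar2 ⊢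
      exact hchar2
  rw [hmin]
  simp only [hmax]
  rw [hchar1]
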